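-- pv_equiv track=rewrite | github.com/dios2003/education | module2hard_1.py | get_kod_1
-- ===== SOURCE A (Python) =====
-- def get_kod_1(n):
--     numbers = list()
--     numbers_1 = list()
--     _list_result = list()
--     for i in range(1, n):
--         numbers.append(i)
--     for i in range(1,20):
--         numbers_1.append(i)
--     for i in range(0, len(numbers)):
--         for j in range(i + 1, len(numbers_1)):
--             if len(numbers_1) > 1:
--                 _sum_par = numbers[i] + numbers_1[j]
--                 if n % _sum_par == 0:
--                     _list_result.append(numbers[i])
--                     _list_result.append(numbers_1[j])
--                 continue
--             numbers_1.remove(numbers_1[j])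
--     return _list_result
-- ===== SOURCE B (Python) =====
-- def get_kod_1(n):
--     # Divisor-first enumeration: for each candidate pair-sum s that divides n,
--     # list the pairs (a, b) with a + b = s, 1 <= a < b <= 19 and a < n, then
--     # sort the pairs lexicographically to restore A's (a asc, b asc) order.
--     pairs = []
--     for s in range(3, 38):
--         if n % s == 0:
--             for a in range(max(1, s - 19), (s + 1) // 2):
--                 if a < n:
--                     pairs.append((a, s - a))
--     pairs.sort()
--     return [x for p in pairs for x in p]
-- ===== Notes on version B (the rewrite author's own statement) =====
-- stated objective: faster
-- what changed: B inverts the search: instead of scanning every value of an n-length list against each second element, it enumerates the bounded range of candidate pair-sums, keeps those dividing n, expands each into its pairs (a, s-a) and sorts the pairs lexicographically to restore A's output order.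
import Mathlib
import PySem

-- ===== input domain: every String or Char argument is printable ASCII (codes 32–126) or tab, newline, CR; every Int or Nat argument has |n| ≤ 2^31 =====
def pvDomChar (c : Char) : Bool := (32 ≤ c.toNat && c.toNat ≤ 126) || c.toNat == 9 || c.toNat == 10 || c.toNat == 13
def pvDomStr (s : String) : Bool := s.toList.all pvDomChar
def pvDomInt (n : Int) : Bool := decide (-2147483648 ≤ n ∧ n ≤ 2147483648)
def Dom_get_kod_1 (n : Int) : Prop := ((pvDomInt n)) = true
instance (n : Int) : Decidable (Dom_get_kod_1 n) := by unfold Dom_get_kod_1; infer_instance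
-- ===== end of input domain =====

-- B enumerates divisor sums first (each candidate pair-sum s | n, then the pairs with that sum) and sorts,
-- instead of A's value-by-value scan over an n-length list (objective: faster, no n-length list).

-- ===== PORT A =====
-- A port: numbers = [1..n-1], numbers_1 = [1..19]; nested index loops; indexing is in range so pyGetD is exact.
def get_kod_1 (n : Int) : List Int :=
  let numbers := PySem.List.pyRange 1 n
  let numbers_1 := PySem.List.pyRange 1 20
  (PySem.List.pyRange 0 (numbers.length : Int)).foldl (fun acc i =>
    (PySem.List.pyRange (i + 1) (numbers_1.length : Int)).foldl (fun acc2 j =>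
      if numbers_1.length > 1 then
        -- `continue` after this block; the `remove` line is unreachable (numbers_1 always has 19 elements)
        if PySem.Int.mod n (PySem.List.pyGetD numbers i 0 + PySem.List.pyGetD numbers_1 j 0) = 0 then
          acc2 ++ [PySem.List.pyGetD numbers i 0] ++ [PySem.List.pyGetD numbers_1 j 0]
        else acc2
      else acc2) acc) []

-- ===== PORT B =====
-- B port: for each sum s in 3..37 dividing n, append the pairs (a, s-a) with
-- max(1,s-19) <= a < (s+1)//2 and a < n; sort the pairs (Python tuple sort = sorted2); flatten.
def pvPairsLoop (n : Int) : List (Int × Int) :=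
  (PySem.List.pyRange 3 38).foldl (fun ps s =>
    if PySem.Int.mod n s = 0 then
      (PySem.List.pyRange (max 1 (s - 19)) (PySem.Int.floordiv (s + 1) 2)).foldl (fun ps2 a =>
        if a < n then ps2 ++ [(a, s - a)] else ps2) ps
    else ps) []

def get_kod_1_alt (n : Int) : List Int :=
  (PySem.List.sorted2 (pvPairsLoop n) (fun p => p.1) (fun p => p.2)).flatMap (fun p => [p.1, p.2])

-- ===== PRECONDITION & SPEC =====
def Spec_get_kod_1 (n : Int) (out : List Int) : Prop := out = get_kod_1_alt n
instance (n : Int) (out : List Int) : Decidable (Spec_get_kod_1 n out) := by unfold Spec_get_kod_1; infer_instance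

-- ===== CLAIM (what is proved, stated in full; the proofs are below) =====
def Claim_equal_get_kod_1 : Prop := ∀ (n : Int), Dom_get_kod_1 n → Spec_get_kod_1 n (get_kod_1 n)

-- ===== LEMMAS AND PROOFS =====

-- all admissible pairs (a, b), 1 <= a < b <= 19, in A's (lexicographic) order
def pvPairsAll : List (Int × Int) :=
  (PySem.List.pyRange 1 19).flatMap (fun a => (PySem.List.pyRange (a + 1) 20).map (fun b => (a, b)))

-- A's selected pairs, in A's order
def pvMf (n : Int) : List (Int × Int) :=
  pvPairsAll.filter (fun p => decide (p.1 < n) && decide (PySem.Int.mod n (p.1 + p.2) = 0))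

-- B's pairs for one sum s
def pvBlock (n s : Int) : List (Int × Int) :=
  ((PySem.List.pyRange (max 1 (s - 19)) (PySem.Int.floordiv (s + 1) 2)).filter
    (fun a => decide (a < n))).map (fun a => (a, s - a))

-- B's unsorted pair list
def pvLf (n : Int) : List (Int × Int) :=
  (PySem.List.pyRange 3 38).flatMap (fun s => if PySem.Int.mod n s = 0 then pvBlock n s else [])

-- shift a unit-step range by one
theorem pvRange_shift (a b : Int) :
    PySem.List.pyRange (a + 1) (b + 1) = (PySem.List.pyRange a b).map (· + 1) := by
  simp only [PySem.List.pyRange_one, List.map_map]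
  have : b + 1 - (a + 1) = b - a := by ring
  rw [this]
  exact List.map_congr_left (fun k _ => by simp; ring)

-- A's inner loop, on pair values
def pvInner (n a : Int) (acc : List Int) : List Int :=
  (PySem.List.pyRange (a + 1) 20).foldl (fun acc2 b =>
    if PySem.Int.mod n (a + b) = 0 then acc2 ++ [a] ++ [b] else acc2) acc

theorem pvA_as (n : Int) :
    get_kod_1 n =
      (PySem.List.pyRange 0 (((n - 1).toNat : Int))).foldl (fun acc i => pvInner n (i + 1) acc) [] := by
  unfold get_kod_1
  simp only [PySem.List.length_pyRange_one]
  have h20 : ((20 : Int) - 1).toNat = 19 := by decide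
  rw [h20]
  apply PySem.List.foldl_congr_mem
  intro acc i hi
  rcases PySem.List.mem_pyRange_one.mp hi with ⟨hi0, hi1⟩
  unfold pvInner
  have hsh : PySem.List.pyRange (i + 1 + 1) (20 : Int)
      = (PySem.List.pyRange (i + 1) 19).map (· + 1) := by
    have := pvRange_shift (i + 1) 19
    norm_num at this ⊢
    exact this
  rw [hsh, List.foldl_map]
  apply PySem.List.foldl_congr_mem
  intro acc2 j hj
  rcases PySem.List.mem_pyRange_one.mp hj with ⟨hj0, hj1⟩
  have hilen : i < ((PySem.List.pyRange 1 n).length : Int) := by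
    rw [PySem.List.length_pyRange_one]; omega
  have hjlen : j < ((PySem.List.pyRange 1 20).length : Int) := by
    rw [PySem.List.length_pyRange_one]; omega
  have hj0' : (0 : Int) ≤ j := by omega
  have hgi : PySem.List.pyGetD (PySem.List.pyRange 1 n) i 0 = i + 1 := by
    rw [PySem.List.pyGetD_eq_getElem _ _ hi0 hilen, PySem.List.getElem_pyRange_one]
    omega
  have hgj : PySem.List.pyGetD (PySem.List.pyRange 1 20) j 0 = j + 1 := by
    rw [PySem.List.pyGetD_eq_getElem _ _ hj0' hjlen, PySem.List.getElem_pyRange_one]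
    omega
  rw [hgi, hgj]
  rw [if_pos (show (19 : Nat) > 1 by decide)]

-- A's inner loop as "append the selected pairs for this first element"
def pvGoodB (n a : Int) : List Int :=
  ((PySem.List.pyRange (a + 1) 20).filter (fun b => decide (PySem.Int.mod n (a + b) = 0))).flatMap
    (fun b => [a, b])

theorem pvInner_eq (n a : Int) (acc : List Int) : pvInner n a acc = acc ++ pvGoodB n a := by
  unfold pvInner pvGoodB
  rw [PySem.List.foldl_ite_eq_foldl_filter (p := fun b => PySem.Int.mod n (a + b) = 0)
      (f := fun acc2 b => acc2 ++ [a] ++ [b])]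
  rw [show (fun (acc2 : List Int) b => acc2 ++ [a] ++ [b]) = (fun acc2 b => acc2 ++ [a, b]) from
      by funext acc2 b; simp]
  exact PySem.List.foldl_append_eq_flatMap (fun b => [a, b]) _ acc

-- A as a flatMap over first elements
theorem pvA_flat (n : Int) :
    get_kod_1 n = (PySem.List.pyRange 1 n).flatMap (pvGoodB n) := by
  rw [pvA_as]
  rw [PySem.List.foldl_congr_mem _ (fun acc i => pvInner n (i + 1) acc)
      (fun acc i => acc ++ pvGoodB n (i + 1)) []
      (fun acc i _ => pvInner_eq n (i + 1) acc)]
  rw [PySem.List.foldl_append_eq_flatMap (fun i => pvGoodB n (i + 1))]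
  by_cases h1 : n ≤ 1
  · rw [PySem.List.pyRange_one_eq_nil (show ((n - 1).toNat : Int) ≤ 0 by omega),
        PySem.List.pyRange_one_eq_nil (by omega)]
    rfl
  · have hcast : (((n - 1).toNat : Int)) = n - 1 := by omega
    rw [hcast]
    have h : PySem.List.pyRange 1 n = (PySem.List.pyRange 0 (n - 1)).map (· + 1) := by
      have h' := pvRange_shift 0 (n - 1)
      rw [show (0 : Int) + 1 = 1 from rfl, show n - 1 + 1 = n from by ring] at h'
      exact h'
    rw [h, List.flatMap_map]
    rfl

-- A equals the filtered canonical pair list, flattened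
theorem pvA_norm (n : Int) :
    get_kod_1 n = (pvMf n).flatMap (fun p => [p.1, p.2]) := by
  rw [pvA_flat]
  have R1 : (pvMf n).flatMap (fun p : Int × Int => [p.1, p.2]) =
      (PySem.List.pyRange 1 19).flatMap (fun a => if a < n then pvGoodB n a else []) := by
    unfold pvMf pvPairsAll
    rw [List.filter_flatMap, List.flatMap_assoc]
    apply List.flatMap_congr
    intro a _
    rw [List.filter_map, List.flatMap_map]
    by_cases h : a < n
    · rw [if_pos h]
      unfold pvGoodB
      simp [Function.comp_def, h]
    · rw [if_neg h]
      simp [Function.comp_def, h]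
  have R2 : (PySem.List.pyRange 1 n).flatMap (pvGoodB n) =
      (PySem.List.pyRange 1 19).flatMap (fun a => if a < n then pvGoodB n a else []) := by
    by_cases h1 : n ≤ 1
    · rw [PySem.List.pyRange_one_eq_nil h1, List.flatMap_nil]
      symm
      rw [List.flatMap_eq_nil_iff]
      intro a ha
      rw [if_neg (by have := (PySem.List.mem_pyRange_one.mp ha).1; omega)]
    · by_cases h2 : n ≤ 19
      · rw [PySem.List.pyRange_one_append 1 n 19 (by omega) (by omega), List.flatMap_append]
        have t1 : (PySem.List.pyRange 1 n).flatMap (fun a => if a < n then pvGoodB n a else []) =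
            (PySem.List.pyRange 1 n).flatMap (pvGoodB n) :=
          List.flatMap_congr (fun a ha => if_pos (PySem.List.mem_pyRange_one.mp ha).2)
        have t2 : (PySem.List.pyRange n 19).flatMap (fun a => if a < n then pvGoodB n a else []) =
            ([] : List Int) :=
          List.flatMap_eq_nil_iff.mpr (fun a ha =>
            if_neg (by have := (PySem.List.mem_pyRange_one.mp ha).1; omega))
        rw [t1, t2, List.append_nil]
      · rw [PySem.List.pyRange_one_append 1 19 n (by omega) (by omega), List.flatMap_append]
        have t3 : (PySem.List.pyRange 19 n).flatMap (pvGoodB n) = ([] : List Int) :=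
          List.flatMap_eq_nil_iff.mpr (fun a ha => by
            have := (PySem.List.mem_pyRange_one.mp ha).1
            unfold pvGoodB
            rw [PySem.List.pyRange_one_eq_nil (by omega)]
            rfl)
        have t4 : (PySem.List.pyRange 1 19).flatMap (fun a => if a < n then pvGoodB n a else []) =
            (PySem.List.pyRange 1 19).flatMap (pvGoodB n) :=
          List.flatMap_congr (fun a ha =>
            if_pos (by have := (PySem.List.mem_pyRange_one.mp ha).2; omega))
        rw [t3, t4, List.append_nil]
  rw [R1, R2]

-- B's pair loop builds pvLf
theorem pvB_pairs (n : Int) : pvPairsLoop n = pvLf n := by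
  unfold pvPairsLoop pvLf
  rw [PySem.List.foldl_congr_mem _ _
      (fun ps s => ps ++ (if PySem.Int.mod n s = 0 then pvBlock n s else [])) []
      (by
        intro ps s _
        show _ = ps ++ (if PySem.Int.mod n s = 0 then pvBlock n s else [])
        by_cases h : PySem.Int.mod n s = 0
        · rw [if_pos h, if_pos h]
          exact PySem.List.foldl_append_ite (fun a => a < n) (fun a => (a, s - a)) _ ps
        · rw [if_neg h, if_neg h, List.append_nil])]
  rw [PySem.List.foldl_append_eq_flatMap]
  rfl

-- Python's tuple sort is the sort under the lexicographic key
theorem pvSorted2_eq (xs : List (Int × Int)) :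
    PySem.List.sorted2 xs (fun p => p.1) (fun p => p.2) =
      PySem.List.sorted xs (fun p => toLex p) := by
  rw [PySem.List.sorted_eq_foldl_insertBy]
  simp only [PySem.List.sorted2]
  simp only [if_neg (by decide : ¬ (false = true))]
  rw [show (fun (a b : Int × Int) =>
        decide (a.1 < b.1) || (!decide (b.1 < a.1) && decide (a.2 < b.2))) =
      (fun a b => decide (toLex a < toLex b)) from by
    funext a b
    by_cases h1 : a.1 < b.1 <;> by_cases h2 : b.1 < a.1 <;> by_cases h3 : a.2 < b.2 <;>
      simp [h1, h2, h3, Prod.Lex.toLex_lt_toLex] <;> omega]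

-- a unit-step range is strictly increasing
theorem pvRange_pairwise (a b : Int) : List.Pairwise (· < ·) (PySem.List.pyRange a b) := by
  rw [PySem.List.pyRange_one, List.pairwise_map]
  exact List.pairwise_lt_range.imp (fun h => by omega)

theorem pvBracket (s a : Int) :
    a < PySem.Int.floordiv (s + 1) 2 ↔ a < s - a := by
  rw [Int.lt_iff_add_one_le, PySem.Int.le_floordiv_iff_mul_le (by omega)]
  omega

theorem pvBlock_sum {n s : Int} {p : Int × Int} (h : p ∈ pvBlock n s) : p.1 + p.2 = s := by
  unfold pvBlock at h
  rcases List.mem_map.mp h with ⟨a, _, rfl⟩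
  simp

theorem pvMem_ite {n s : Int} {p : Int × Int}
    (h : p ∈ (if PySem.Int.mod n s = 0 then pvBlock n s else [])) : p ∈ pvBlock n s := by
  by_cases hc : PySem.Int.mod n s = 0
  · rwa [if_pos hc] at h
  · rw [if_neg hc] at h; cases h

theorem pvBlock_pairwise (n s : Int) :
    List.Pairwise (fun p q : Int × Int => toLex (p.1 + p.2, p.1) < toLex (q.1 + q.2, q.1))
      (pvBlock n s) := by
  unfold pvBlock
  rw [List.pairwise_map]
  apply List.Pairwise.filter
  apply (pvRange_pairwise _ _).imp
  intro a1 a2 h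
  refine Prod.Lex.toLex_lt_toLex.mpr (Or.inr ⟨by omega, by simpa⟩)

theorem pvLf_pairwise (n : Int) :
    List.Pairwise (fun p q : Int × Int => toLex (p.1 + p.2, p.1) < toLex (q.1 + q.2, q.1))
      (pvLf n) := by
  unfold pvLf
  rw [List.flatMap_def, List.pairwise_flatten]
  constructor
  · intro l hl
    rcases List.mem_map.mp hl with ⟨s, _, rfl⟩
    by_cases h : PySem.Int.mod n s = 0
    · rw [if_pos h]; exact pvBlock_pairwise n s
    · rw [if_neg h]; exact List.Pairwise.nil
  · rw [List.pairwise_map]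
    apply (pvRange_pairwise 3 38).imp
    intro s1 s2 h x hx y hy
    have e1 := pvBlock_sum (pvMem_ite hx)
    have e2 := pvBlock_sum (pvMem_ite hy)
    exact Prod.Lex.toLex_lt_toLex.mpr (Or.inl (by omega))

set_option maxRecDepth 4096 in
theorem pvPairsAll_pairwise :
    List.Pairwise (fun p q : Int × Int => toLex p < toLex q) pvPairsAll := by decide

theorem pvMf_pairwise (n : Int) :
    List.Pairwise (fun p q : Int × Int => toLex p < toLex q) (pvMf n) :=
  pvPairsAll_pairwise.filter _

theorem pvMf_nodup (n : Int) : (pvMf n).Nodup := by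
  apply List.Pairwise.imp ?_ (pvMf_pairwise n)
  intro a b h heq
  subst heq
  exact lt_irrefl _ h

theorem pvLf_nodup (n : Int) : (pvLf n).Nodup := by
  apply List.Pairwise.imp ?_ (pvLf_pairwise n)
  intro a b h heq
  subst heq
  exact lt_irrefl _ h

theorem pvMem_Mf (n : Int) (p : Int × Int) :
    p ∈ pvMf n ↔
      1 ≤ p.1 ∧ p.1 < p.2 ∧ p.2 ≤ 19 ∧ p.1 < n ∧ PySem.Int.mod n (p.1 + p.2) = 0 := by
  unfold pvMf pvPairsAll
  simp only [List.mem_filter, List.mem_flatMap, List.mem_map, PySem.List.mem_pyRange_one,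
    Bool.and_eq_true, decide_eq_true_eq]
  constructor
  · rintro ⟨⟨a, ⟨ha1, ha2⟩, b, ⟨hb1, hb2⟩, rfl⟩, h1, h2⟩
    exact ⟨ha1, by omega, by omega, h1, h2⟩
  · rintro ⟨h1, h2, h3, h4, h5⟩
    exact ⟨⟨p.1, ⟨h1, by omega⟩, p.2, ⟨by omega, by omega⟩, rfl⟩, h4, h5⟩

theorem pvMem_Lf (n : Int) (p : Int × Int) :
    p ∈ pvLf n ↔
      1 ≤ p.1 ∧ p.1 < p.2 ∧ p.2 ≤ 19 ∧ p.1 < n ∧ PySem.Int.mod n (p.1 + p.2) = 0 := by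
  unfold pvLf
  simp only [List.mem_flatMap, PySem.List.mem_pyRange_one]
  constructor
  · rintro ⟨s, ⟨hs1, hs2⟩, hmem⟩
    have hc : PySem.Int.mod n s = 0 := by
      by_cases hc : PySem.Int.mod n s = 0
      · exact hc
      · rw [if_neg hc] at hmem; cases hmem
    have hb := pvMem_ite hmem
    unfold pvBlock at hb
    rcases List.mem_map.mp hb with ⟨a, ha, rfl⟩
    rcases List.mem_filter.mp ha with ⟨hr, hn⟩
    rcases PySem.List.mem_pyRange_one.mp hr with ⟨hlo, hhi⟩
    have hlt := (pvBracket s a).mp hhi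
    have hn' : a < n := of_decide_eq_true hn
    refine ⟨by simp; omega, by simp; omega, by simp; omega, by simpa, ?_⟩
    simpa [show a + (s - a) = s from by ring] using hc
  · rintro ⟨h1, h2, h3, h4, h5⟩
    refine ⟨p.1 + p.2, ⟨by omega, by omega⟩, ?_⟩
    rw [if_pos h5]
    unfold pvBlock
    apply List.mem_map.mpr
    refine ⟨p.1, List.mem_filter.mpr ⟨PySem.List.mem_pyRange_one.mpr
      ⟨by omega, (pvBracket _ _).mpr (by omega)⟩, by simpa⟩, by simp⟩

theorem pvPerm (n : Int) : (pvMf n).Perm (pvLf n) :=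
  (List.perm_ext_iff_of_nodup (pvMf_nodup n) (pvLf_nodup n)).mpr
    (fun p => (pvMem_Mf n p).trans (pvMem_Lf n p).symm)

-- sorting B's pairs gives A's pair list
theorem pvSorted_Lf (n : Int) :
    PySem.List.sorted (pvLf n) (fun p => toLex p) = pvMf n :=
  PySem.List.sorted_eq_of_perm_of_pairwise_lt (pvLf n) (pvMf n) (fun p => toLex p)
    (pvPerm n) (pvMf_pairwise n)

-- ===== VERDICT (by name: the statement is the Claim_ definition above) =====
theorem get_kod_1_spec : Claim_equal_get_kod_1 := by
  intro n _
  unfold Spec_get_kod_1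
  rw [pvA_norm]
  show _ = get_kod_1_alt n
  unfold get_kod_1_alt
  rw [pvB_pairs, pvSorted2_eq, pvSorted_Lf]
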